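-- pv_equiv track=rewrite | github.com/ldmckeen/ldm-tutorials | Coding/practice/max_sub_string.py | maxSubString
-- ===== SOURCE A (Python) =====
-- def maxSubString(s):
--     maxchar = 'a'
--     subs = []
--
--     for i in range(len(s)):
--         if (s[i] >= maxchar):
--             maxchar = s[i]
--             subs.append(i)
--
--     max_ss = ""
--
--     for i in range(len(subs)):
--         if (s[subs[i]: len(s)] > max_ss):
--             max_ss = s[subs[i]: len(s)]
--     return max_ss
-- ===== SOURCE B (Python) =====
-- def maxSubString(s):
--     best = ""
--     for i in range(len(s)):
--         if s[i] >= 'a' and s[i:] > best: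
--             best = s[i:]
--     return best
-- ===== Notes on version B (the rewrite author's own statement) =====
-- stated objective: simpler
-- what changed: A keeps a running maximum character and a list of candidate indices, then re-scans those candidates for the greatest suffix; B is a single pass that directly keeps the greatest suffix starting at any character >= 'a', with no candidate bookkeeping.
import Mathlib
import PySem

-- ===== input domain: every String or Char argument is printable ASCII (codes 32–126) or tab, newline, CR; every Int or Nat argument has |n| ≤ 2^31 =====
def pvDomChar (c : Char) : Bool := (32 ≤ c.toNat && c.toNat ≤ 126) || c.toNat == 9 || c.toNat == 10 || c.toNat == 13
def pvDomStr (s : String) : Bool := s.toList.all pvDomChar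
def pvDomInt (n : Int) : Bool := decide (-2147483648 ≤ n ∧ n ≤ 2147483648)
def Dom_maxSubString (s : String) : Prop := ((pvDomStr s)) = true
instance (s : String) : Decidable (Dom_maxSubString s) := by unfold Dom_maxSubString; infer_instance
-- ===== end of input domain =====

-- B replaces A's two-phase scan (running-max candidate indices, then a rescan of their
-- suffixes) by one direct pass keeping the greatest suffix starting at a char ≥ 'a'.

-- ===== PORT A =====
-- Python string comparisons ('>=' on 1-char strings, '>' on strings) are code-point
-- lexicographic: ported exactly as Char ≤ and the lexicographic < on List Char.
def maxSubString (s : String) : String :=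
  let L := s.toList
  -- for i in range(len(s)): if s[i] >= maxchar: maxchar = s[i]; subs.append(i)
  let st := (PySem.List.pyRange 0 (PySem.Str.len s) 1).foldl
    (fun (p : Char × List Int) i =>
      if p.1 ≤ PySem.List.pyGetD L i ' '
      then (PySem.List.pyGetD L i ' ', p.2 ++ [i]) else p)
    ('a', [])
  -- for i in range(len(subs)): if s[subs[i]:len(s)] > max_ss: max_ss = s[subs[i]:len(s)]
  let maxSS := (PySem.List.pyRange 0 (PySem.List.len st.2) 1).foldl
    (fun (acc : List Char) i =>
      if acc < PySem.List.slice L (some (PySem.List.pyGetD st.2 i 0)) (some (PySem.Str.len s))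
      then PySem.List.slice L (some (PySem.List.pyGetD st.2 i 0)) (some (PySem.Str.len s))
      else acc) []
  String.ofList maxSS

-- ===== PORT B =====
def maxSubString_alt (s : String) : String :=
  let L := s.toList
  -- for i in range(len(s)): if s[i] >= 'a' and s[i:] > best: best = s[i:]
  let best := (PySem.List.pyRange 0 (PySem.Str.len s) 1).foldl
    (fun (acc : List Char) i =>
      if 'a' ≤ PySem.List.pyGetD L i ' ' ∧ acc < PySem.List.slice L (some i) none
      then PySem.List.slice L (some i) none else acc) []
  String.ofList best

-- ===== PRECONDITION & SPEC =====
def Spec_maxSubString (s : String) (out : String) : Prop := out = maxSubString_alt s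
instance (s : String) (out : String) : Decidable (Spec_maxSubString s out) := by unfold Spec_maxSubString; infer_instance

-- ===== CLAIM (what is proved, stated in full; the proofs are below) =====
def Claim_equal_maxSubString : Prop := ∀ (s : String), Dom_maxSubString s → Spec_maxSubString s (maxSubString s)

-- ===== LEMMAS AND PROOFS =====

-- Suffix-based model of A's first loop: instead of the index i it records the suffix s[i:].
def pvScanA : List Char → Char → List (List Char) → Char × List (List Char)
  | [], m, acc => (m, acc)
  | c :: cs, m, acc =>
    if m ≤ c then pvScanA cs c (acc ++ [c :: cs]) else pvScanA cs m acc

-- Suffix-based model of B's loop.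
def pvRunB : List Char → List Char → List Char
  | [], acc => acc
  | c :: cs, acc =>
    if 'a' ≤ c ∧ acc < c :: cs then pvRunB cs (c :: cs) else pvRunB cs acc

-- A's second loop as a fold: running lexicographic maximum with default [].
def pvStep (acc x : List Char) : List Char := if acc < x then x else acc

def pvM (l : List (List Char)) : List Char := l.foldl pvStep []

lemma pvStep_le (b x : List Char) : b ≤ pvStep b x := by
  unfold pvStep; split
  · exact le_of_lt (by assumption)
  · exact le_refl b

lemma le_foldl_pvStep (l : List (List Char)) : ∀ b, b ≤ l.foldl pvStep b := by
  induction l with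
  | nil => intro b; exact le_refl b
  | cons x xs ih => intro b; exact le_trans (pvStep_le b x) (ih (pvStep b x))

lemma mem_le_foldl_pvStep (l : List (List Char)) :
    ∀ b x, x ∈ l → x ≤ l.foldl pvStep b := by
  induction l with
  | nil => intro _ _ h; cases h
  | cons y ys ih =>
    intro b x hx
    rcases List.mem_cons.1 hx with h | h
    · subst h
      refine le_trans ?_ (le_foldl_pvStep ys (pvStep b x))
      unfold pvStep; split
      · exact le_refl x
      · exact not_lt.1 (by assumption)
    · exact ih (pvStep b y) x h

lemma pvM_append_singleton (l : List (List Char)) (x : List Char) :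
    pvM (l ++ [x]) = pvStep (pvM l) x := by
  unfold pvM; rw [List.foldl_append]; rfl

-- Core equivalence: B's direct pass computes the same value as the maximum over A's
-- pruned candidate suffixes, given A's loop invariant ('a' ≤ m, and m is attained by
-- a recorded candidate unless m is still 'a').
lemma pvMain : ∀ (t : List Char) (m : Char) (acc : List (List Char)),
    'a' ≤ m → (m = 'a' ∨ ∃ u ∈ acc, ∃ cs', u = m :: cs') →
    pvRunB t (pvM acc) = pvM (pvScanA t m acc).2 := by
  intro t
  induction t with
  | nil => intro m acc _ _; rfl
  | cons c cs ih =>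
    intro m acc hm hwit
    by_cases hmc : m ≤ c
    · -- A records the suffix c :: cs; its new running max is c.
      have hac : 'a' ≤ c := le_trans hm hmc
      have hwit' : c = 'a' ∨ ∃ u ∈ acc ++ [c :: cs], ∃ cs', u = c :: cs' :=
        Or.inr ⟨c :: cs, List.mem_append_right _ (List.mem_singleton.2 rfl), cs, rfl⟩
      have hIH := ih c (acc ++ [c :: cs]) hac hwit'
      rw [pvM_append_singleton] at hIH
      simp only [pvScanA, if_pos hmc]
      by_cases hlt : pvM acc < c :: cs
      · simp only [pvRunB, if_pos (And.intro hac hlt)]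
        rw [← hIH]; unfold pvStep; rw [if_pos hlt]
      · simp only [pvRunB]
        rw [if_neg (by intro h; exact hlt h.2)]
        rw [← hIH]; unfold pvStep; rw [if_neg hlt]
    · -- c < m: A prunes this suffix; B's comparison also rejects it, because a
      -- recorded candidate starting with m dominates it.
      have hcm : c < m := lt_of_not_ge hmc
      have hnot : ¬ ('a' ≤ c ∧ pvM acc < c :: cs) := by
        rintro ⟨hac, hlt⟩
        rcases hwit with h | ⟨u, hu, cs', rfl⟩
        · subst h; exact hmc hac
        · have h1 : (c :: cs) < (m :: cs') := List.Lex.rel hcm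
          have h2 : (m :: cs') ≤ pvM acc := mem_le_foldl_pvStep acc [] _ hu
          exact absurd hlt (not_lt.2 (le_of_lt (lt_of_lt_of_le h1 h2)))
      simp only [pvRunB, pvScanA, if_neg hnot, if_neg hmc]
      exact ih m acc hm hwit

-- The suffix of L at a natural position k, written as the two slice forms the ports use.
lemma pv_slice_drop (L : List Char) (k : Nat) :
    PySem.List.slice L (some (k : Int)) (some (L.length : Int)) = L.drop k := by
  rw [PySem.List.slice_natCast]
  exact List.take_of_length_le (by simp)

lemma pv_slice_from_drop (L : List Char) (k : Nat) :
    PySem.List.slice L (some (k : Int)) none = L.drop k := by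
  exact PySem.List.slice_from_natCast L k

-- Bridge for A's first loop: the enumerate-fold over int indices equals pvScanA on
-- suffixes, mapping each recorded index j to the slice L[j:len(L)].
lemma pvBridgeA (L : List Char) : ∀ (xs : List Char) (k : Nat) (m : Char) (accI : List Int),
    L.drop k = xs →
    ((PySem.List.enumerate xs (k : Int)).foldl
        (fun (p : Char × List Int) q =>
          if p.1 ≤ q.2 then (q.2, p.2 ++ [q.1]) else p) (m, accI)).2.map
        (fun j => PySem.List.slice L (some j) (some (L.length : Int)))
      = (pvScanA xs m
          (accI.map (fun j => PySem.List.slice L (some j) (some (L.length : Int))))).2 := by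
  intro xs
  induction xs with
  | nil => intro k m accI _; simp [PySem.List.enumerate_nil, pvScanA]
  | cons c cs ih =>
    intro k m accI hk
    have hk1 : L.drop (k + 1) = cs := by
      simpa [List.drop_drop, Nat.add_comm] using congrArg (List.drop 1) hk
    have hsl : PySem.List.slice L (some (k : Int)) (some (L.length : Int)) = c :: cs := by
      rw [pv_slice_drop, hk]
    rw [PySem.List.enumerate_cons]
    simp only [List.foldl_cons]
    by_cases hmc : m ≤ c
    · rw [if_pos hmc]
      have hcast : ((k : Int) + 1) = ((k + 1 : Nat) : Int) := by push_cast; ring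
      rw [hcast, ih (k + 1) c (accI ++ [(k : Int)]) hk1]
      simp only [pvScanA, if_pos hmc, List.map_append, List.map_cons, List.map_nil, hsl]
    · rw [if_neg hmc]
      have hcast : ((k : Int) + 1) = ((k + 1 : Nat) : Int) := by push_cast; ring
      rw [hcast, ih (k + 1) m accI hk1]
      simp only [pvScanA, if_neg hmc]

-- Bridge for B's loop: the enumerate-fold over int indices equals pvRunB on suffixes.
lemma pvBridgeB (L : List Char) : ∀ (xs : List Char) (k : Nat) (acc : List Char),
    L.drop k = xs →
    (PySem.List.enumerate xs (k : Int)).foldl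
        (fun (acc : List Char) q =>
          if 'a' ≤ q.2 ∧ acc < PySem.List.slice L (some q.1) none
          then PySem.List.slice L (some q.1) none else acc) acc
      = pvRunB xs acc := by
  intro xs
  induction xs with
  | nil => intro k acc _; simp [PySem.List.enumerate_nil, pvRunB]
  | cons c cs ih =>
    intro k acc hk
    have hk1 : L.drop (k + 1) = cs := by
      simpa [List.drop_drop, Nat.add_comm] using congrArg (List.drop 1) hk
    have hsl : PySem.List.slice L (some (k : Int)) none = c :: cs := by
      rw [pv_slice_from_drop, hk]
    rw [PySem.List.enumerate_cons]
    simp only [List.foldl_cons, hsl]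
    have hcast : ((k : Int) + 1) = ((k + 1 : Nat) : Int) := by push_cast; ring
    by_cases h : 'a' ≤ c ∧ acc < c :: cs
    · rw [if_pos h, hcast, ih (k + 1) (c :: cs) hk1]
      simp only [pvRunB, if_pos h]
    · rw [if_neg h, hcast, ih (k + 1) acc hk1]
      simp only [pvRunB, if_neg h]

-- A's port computes pvM of the candidate suffixes of pvScanA.
lemma pvPortA (s : String) :
    maxSubString s = String.ofList (pvM (pvScanA s.toList 'a' []).2) := by
  unfold maxSubString
  dsimp only
  set L := s.toList with hL
  have hlen : PySem.Str.len s = PySem.List.len L := by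
    rw [PySem.Str.len_eq, PySem.List.len_eq]
  -- first loop: pyRange fold → enumerate fold → pvScanA
  have h1 : (PySem.List.pyRange 0 (PySem.Str.len s) 1).foldl
      (fun (p : Char × List Int) i =>
        if p.1 ≤ PySem.List.pyGetD L i ' '
        then (PySem.List.pyGetD L i ' ', p.2 ++ [i]) else p) ('a', [])
      = (PySem.List.enumerate L (0 : Int)).foldl
        (fun (p : Char × List Int) q =>
          if p.1 ≤ q.2 then (q.2, p.2 ++ [q.1]) else p) ('a', []) := by
    rw [hlen, PySem.List.enumerate_eq_map_pyRange L ' ', List.foldl_map]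
  rw [h1]
  -- second loop: range(len(subs)) fold → fold over subs → fold over mapped suffixes
  set st := (PySem.List.enumerate L (0 : Int)).foldl
    (fun (p : Char × List Int) q =>
      if p.1 ≤ q.2 then (q.2, p.2 ++ [q.1]) else p) ('a', []) with hst
  have h2 : (PySem.List.pyRange 0 (PySem.List.len st.2) 1).foldl
      (fun (acc : List Char) i =>
        if acc < PySem.List.slice L (some (PySem.List.pyGetD st.2 i 0)) (some (PySem.Str.len s))
        then PySem.List.slice L (some (PySem.List.pyGetD st.2 i 0)) (some (PySem.Str.len s))
        else acc) []
      = (st.2.map (fun j => PySem.List.slice L (some j) (some (L.length : Int)))).foldl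
          pvStep [] := by
    rw [PySem.List.foldl_pyRange_zero_pyGetD st.2 0
      (fun acc j =>
        if acc < PySem.List.slice L (some j) (some (PySem.Str.len s))
        then PySem.List.slice L (some j) (some (PySem.Str.len s)) else acc) []]
    rw [List.foldl_map]
    have hls : PySem.Str.len s = (L.length : Int) := by
      rw [PySem.Str.len_eq, hL]
    rw [hls]; rfl
  rw [h2]
  have h3 : st.2.map (fun j => PySem.List.slice L (some j) (some (L.length : Int)))
      = (pvScanA L 'a' []).2 := by
    have := pvBridgeA L L 0 'a' [] (by simp)
    simpa using this
  rw [h3]; rfl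

-- B's port computes pvRunB starting from the empty best.
lemma pvPortB (s : String) :
    maxSubString_alt s = String.ofList (pvRunB s.toList []) := by
  unfold maxSubString_alt
  dsimp only
  set L := s.toList with hL
  have hlen : PySem.Str.len s = PySem.List.len L := by
    rw [PySem.Str.len_eq, PySem.List.len_eq]
  have h1 : (PySem.List.pyRange 0 (PySem.Str.len s) 1).foldl
      (fun (acc : List Char) i =>
        if 'a' ≤ PySem.List.pyGetD L i ' ' ∧ acc < PySem.List.slice L (some i) none
        then PySem.List.slice L (some i) none else acc) []
      = (PySem.List.enumerate L (0 : Int)).foldl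
        (fun (acc : List Char) q =>
          if 'a' ≤ q.2 ∧ acc < PySem.List.slice L (some q.1) none
          then PySem.List.slice L (some q.1) none else acc) [] := by
    rw [hlen, PySem.List.enumerate_eq_map_pyRange L ' ', List.foldl_map]
  rw [h1]
  exact congrArg String.ofList (by simpa using pvBridgeB L L 0 [] (by simp))

-- ===== VERDICT (by name: the statement is the Claim_ definition above) =====
theorem maxSubString_spec : Claim_equal_maxSubString := by
  intro s _
  unfold Spec_maxSubString
  rw [pvPortA, pvPortB]
  have h := pvMain s.toList 'a' [] (le_refl 'a') (Or.inl rfl)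
  rw [← h]; rfl
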